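-- pv_equiv track=rewrite | github.com/NoVarlok/Click | telegram_bot.py | cut_label_to_golden
-- ===== SOURCE A (Python) =====
-- def cut_label_to_golden(seq):
--     ret = []
--     for t in seq:
--         if t == -100:
--             if len(ret) == 0:
--                 continue
--             else:
--                 break
--         ret.append(t)
--     return ret
-- ===== SOURCE B (Python) =====
-- def cut_label_to_golden(seq):
--     start = next((i for i, t in enumerate(seq) if t != -100), len(seq))
--     rest = seq[start:]
--     end = rest.index(-100) if -100 in rest else len(rest)
--     return rest[:end]
-- ===== Notes on version B (the rewrite author's own statement) =====
-- stated objective: alternative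
-- what changed: Replaced A's element-by-element accumulator loop (with break/continue and an empty-ret guard) by index arithmetic: compute the start index of the first non -100 token and the end index via list.index, then return the slice seq[start:][:end] without collecting elements one by one.
import Mathlib
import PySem

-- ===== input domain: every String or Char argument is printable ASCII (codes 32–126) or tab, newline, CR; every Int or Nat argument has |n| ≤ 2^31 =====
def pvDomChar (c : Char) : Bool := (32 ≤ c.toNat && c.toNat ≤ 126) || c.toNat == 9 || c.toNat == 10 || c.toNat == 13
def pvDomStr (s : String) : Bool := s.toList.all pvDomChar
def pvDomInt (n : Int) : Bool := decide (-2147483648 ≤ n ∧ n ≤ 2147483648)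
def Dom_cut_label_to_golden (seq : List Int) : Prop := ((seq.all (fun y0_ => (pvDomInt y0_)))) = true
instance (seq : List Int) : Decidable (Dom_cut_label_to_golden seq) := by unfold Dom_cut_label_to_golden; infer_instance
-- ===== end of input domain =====

-- B replaces A's element-by-element accumulator loop (break/continue + empty-ret guard)
-- by index arithmetic: find the start and end indices and return the slice seq[start:][:end]
-- (alternative formulation; return value proved identical).

-- ===== PORT A =====
-- A's for-loop with ret accumulator; 'continue' on a leading -100, 'break' otherwise.
def cutLoopA : List Int → List Int → List Int
  | [], ret => ret
  | t :: rest, ret =>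
    if t = -100 then
      if ret.length = 0 then cutLoopA rest ret else ret
    else cutLoopA rest (ret ++ [t])

def cut_label_to_golden (seq : List Int) : List Int := cutLoopA seq []

-- ===== PORT B =====
-- start = first index with t != -100 (default len); rest = seq[start:];
-- end = rest.index(-100) if -100 in rest else len(rest); return rest[:end].
def cut_label_to_golden_alt (seq : List Int) : List Int :=
  let start := seq.findIdx (fun t => t != -100)
  let rest := PySem.List.slice seq (some (start : Int)) none
  let e := match PySem.List.index? rest (-100) with
    | some i => i
    | none => rest.length
  PySem.List.slice rest none (some (e : Int))

-- ===== PRECONDITION & SPEC =====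
def Spec_cut_label_to_golden (seq : List Int) (out : List Int) : Prop := out = cut_label_to_golden_alt seq
instance (seq : List Int) (out : List Int) : Decidable (Spec_cut_label_to_golden seq out) := by unfold Spec_cut_label_to_golden; infer_instance

-- ===== CLAIM (what is proved, stated in full; the proofs are below) =====
def Claim_equal_cut_label_to_golden : Prop := ∀ (seq : List Int), Dom_cut_label_to_golden seq → Spec_cut_label_to_golden seq (cut_label_to_golden seq)

-- ===== LEMMAS AND PROOFS =====

-- Once ret is nonempty, A's loop appends the run of the remainder up to the first -100.
theorem cutLoopA_nonempty (rest ret : List Int) (h : ret ≠ []) :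
    cutLoopA rest ret = ret ++ rest.takeWhile (fun t => t != -100) := by
  induction rest generalizing ret with
  | nil => simp [cutLoopA]
  | cons t rs ih =>
    by_cases ht : t = -100
    · simp [cutLoopA, ht, List.length_eq_zero_iff, h]
    · simp only [cutLoopA, if_neg ht, List.takeWhile_cons]
      rw [ih (ret ++ [t]) (by simp)]
      simp [ht]

-- A's loop = strip the leading -100 run, then take up to the next -100.
theorem cutLoopA_eq (seq : List Int) :
    cutLoopA seq [] = (seq.dropWhile (fun t => t == -100)).takeWhile (fun t => t != -100) := by
  induction seq with
  | nil => simp [cutLoopA]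
  | cons t rs ih =>
    by_cases ht : t = -100
    · simpa [cutLoopA, ht, List.dropWhile_cons] using ih
    · simp only [cutLoopA, if_neg ht, List.dropWhile_cons, List.nil_append]
      rw [cutLoopA_nonempty rs [t] (by simp)]
      simp [ht]

-- dropping the first index whose element is ≠ -100 = dropWhile (= -100).
theorem drop_findIdx_eq (seq : List Int) :
    seq.drop (seq.findIdx (fun t => t != -100)) = seq.dropWhile (fun t => t == -100) := by
  induction seq with
  | nil => simp
  | cons t rs ih =>
    by_cases ht : t = -100
    · simpa [List.findIdx_cons, List.dropWhile_cons, ht] using ih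
    · have hb : (t != -100) = true := by simp [ht]
      simp [List.findIdx_cons, hb, ht]

-- taking up to the first occurrence of -100 (or all if absent) = takeWhile (≠ -100).
theorem take_index_eq (l : List Int) :
    l.take (match List.idxOf? (-100 : Int) l with | some i => i | none => l.length)
      = l.takeWhile (fun t => t != -100) := by
  induction l with
  | nil => simp
  | cons t rs ih =>
    by_cases ht : t = -100
    · simp [List.idxOf?_cons, ht]
    · rw [show List.idxOf? (-100 : Int) (t :: rs) = (List.idxOf? (-100 : Int) rs).map (· + 1)
          from by simp [List.idxOf?_cons, ht]]
      cases h : List.idxOf? (-100 : Int) rs with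
      | none => simpa [List.takeWhile_cons, ht, h] using ih
      | some i => simpa [List.takeWhile_cons, ht, h] using ih

-- ===== VERDICT (by name: the statement is the Claim_ definition above) =====
theorem cut_label_to_golden_spec : Claim_equal_cut_label_to_golden := by
  intro seq _
  unfold Spec_cut_label_to_golden cut_label_to_golden cut_label_to_golden_alt
  simp only [PySem.List.slice_from_natCast, PySem.List.index?_eq_idxOf?]
  rw [cutLoopA_eq, ← drop_findIdx_eq]
  cases h : List.idxOf? (-100 : Int) (seq.drop (seq.findIdx (fun t => t != -100))) with
  | none =>
      simp only [PySem.List.slice_to_natCast]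
      simpa [h] using (take_index_eq (seq.drop (seq.findIdx (fun t => t != -100)))).symm
  | some i =>
      simp only [PySem.List.slice_to_natCast]
      simpa [h] using (take_index_eq (seq.drop (seq.findIdx (fun t => t != -100)))).symm
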